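-- pv_equiv track=rewrite | github.com/nerveband/Apple-Music-Play-History-Converter | tests_toga/test_comprehensive_comparison.py | is_likely_cover_or_remix
-- ===== SOURCE A (Python) =====
-- def is_likely_cover_or_remix(artist_str, track_str=""):
--     """Detect if this is likely a cover/remix version."""
--     if not isinstance(artist_str, str):
--         return False
--
--     artist_lower = artist_str.lower()
--     track_lower = track_str.lower() if track_str else ""
--
--     cover_keywords = [
--         'dj ', 'remix', 'cover', 'tribute', 'karaoke',
--         '8-bit', 'acoustic', 'piano', 'orchestra',
--         'vs ', 'ft ', 'feat.', 'featuring',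
--         'lounge', 'jazz', 'version'
--     ]
--
--     for keyword in cover_keywords:
--         if keyword in artist_lower or keyword in track_lower:
--             return True
--
--     return False
-- ===== SOURCE B (Python) =====
-- COVER_KEYWORDS = [
--     'dj ', 'remix', 'cover', 'tribute', 'karaoke',
--     '8-bit', 'acoustic', 'piano', 'orchestra',
--     'vs ', 'ft ', 'feat.', 'featuring',
--     'lounge', 'jazz', 'version'
-- ]
--
-- def _scan(text):
--     # position-major: walk the text once, testing every keyword at each position
--     for i in range(len(text)):
--         if any(text.startswith(k, i) for k in COVER_KEYWORDS):
--             return True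
--     return False
--
-- def is_likely_cover_or_remix(artist_str, track_str=""):
--     if not isinstance(artist_str, str):
--         return False
--     artist_lower = artist_str.lower()
--     track_lower = track_str.lower() if track_str else ""
--     return _scan(artist_lower) or _scan(track_lower)
-- ===== Notes on version B (the rewrite author's own statement) =====
-- stated objective: alternative
-- what changed: Replaces the keyword-major loop of 16 independent substring searches with a single position-major scan of each lowercased string, testing all keywords as prefixes at each position.
import Mathlib
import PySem

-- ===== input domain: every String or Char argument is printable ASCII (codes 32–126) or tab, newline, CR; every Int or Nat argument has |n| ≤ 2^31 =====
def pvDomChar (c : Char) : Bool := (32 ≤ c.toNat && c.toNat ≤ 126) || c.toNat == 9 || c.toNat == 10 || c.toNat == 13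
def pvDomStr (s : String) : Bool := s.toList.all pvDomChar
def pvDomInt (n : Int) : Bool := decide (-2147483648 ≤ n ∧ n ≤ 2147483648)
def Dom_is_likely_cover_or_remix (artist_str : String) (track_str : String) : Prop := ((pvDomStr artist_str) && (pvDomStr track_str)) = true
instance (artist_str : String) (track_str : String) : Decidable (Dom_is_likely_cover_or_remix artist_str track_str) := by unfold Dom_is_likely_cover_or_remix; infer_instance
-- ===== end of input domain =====

-- B replaces A's keyword-major loop (16 separate `in` substring searches) by one position-major
-- scan of each lowercased string, testing all keywords as prefixes at each position (objective: alternative).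

-- ===== PORT A =====
def coverKeywords : List String :=
  ["dj ", "remix", "cover", "tribute", "karaoke",
   "8-bit", "acoustic", "piano", "orchestra",
   "vs ", "ft ", "feat.", "featuring",
   "lounge", "jazz", "version"]

-- the 'for keyword in cover_keywords: if … return True' loop, with early return
def coverLoop (kws : List String) (a b : String) : Bool :=
  match kws with
  | [] => false
  | k :: rest => if PySem.Str.isIn k a || PySem.Str.isIn k b then true else coverLoop rest a b

def is_likely_cover_or_remix (artist_str : String) (track_str : String) : Bool :=
  -- artist_lower / track_lower computed inline ('if track_str' truthiness = nonempty string)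
  coverLoop coverKeywords (PySem.Str.lower artist_str)
    (if track_str == "" then "" else PySem.Str.lower track_str)

-- ===== PORT B =====
def coverKeywordsAlt : List (List Char) :=
  ["dj ".toList, "remix".toList, "cover".toList, "tribute".toList, "karaoke".toList,
   "8-bit".toList, "acoustic".toList, "piano".toList, "orchestra".toList,
   "vs ".toList, "ft ".toList, "feat.".toList, "featuring".toList,
   "lounge".toList, "jazz".toList, "version".toList]

-- Source B's _scan: walk the text once; at each position test every keyword with startswith
def scanPos (kws : List (List Char)) : List Char → Bool
  | [] => false
  | c :: t => kws.any (fun k => PySem.Chars.startswith (c :: t) k) || scanPos kws t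

def is_likely_cover_or_remix_alt (artist_str : String) (track_str : String) : Bool :=
  scanPos coverKeywordsAlt (PySem.Str.lower artist_str).toList ||
    scanPos coverKeywordsAlt (if track_str == "" then "" else PySem.Str.lower track_str).toList

-- ===== PRECONDITION & SPEC =====
def Spec_is_likely_cover_or_remix (artist_str : String) (track_str : String) (out : Bool) : Prop := out = is_likely_cover_or_remix_alt artist_str track_str
instance (artist_str : String) (track_str : String) (out : Bool) : Decidable (Spec_is_likely_cover_or_remix artist_str track_str out) := by unfold Spec_is_likely_cover_or_remix; infer_instance

-- ===== CLAIM (what is proved, stated in full; the proofs are below) =====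
def Claim_equal_is_likely_cover_or_remix : Prop := ∀ (artist_str : String) (track_str : String), Dom_is_likely_cover_or_remix artist_str track_str → Spec_is_likely_cover_or_remix artist_str track_str (is_likely_cover_or_remix artist_str track_str)

-- ===== LEMMAS AND PROOFS =====

-- A's loop is 'any keyword found in a or in b'
theorem coverLoop_eq_any (kws : List String) (a b : String) :
    coverLoop kws a b = kws.any (fun k => PySem.Str.isIn k a || PySem.Str.isIn k b) := by
  induction kws with
  | nil => rfl
  | cons k rest ih =>
    simp only [coverLoop, List.any_cons, ih]
    by_cases h : (PySem.Str.isIn k a || PySem.Str.isIn k b) = true <;> simp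

-- B's position-major scan finds exactly the keywords occurring as infixes
theorem scanPos_eq_any (kws : List (List Char)) (h : ∀ k ∈ kws, k ≠ []) (s : List Char) :
    scanPos kws s = kws.any (fun k => PySem.Chars.isIn k s) := by
  induction s with
  | nil =>
    simp only [scanPos]
    symm
    rw [List.any_eq_false]
    intro k hk
    have hne := h k hk
    simp [PySem.Chars.isIn_eq_false_iff, List.infix_nil, hne]
  | cons c t ih =>
    simp only [scanPos, ih]
    rw [Bool.eq_iff_iff]
    simp only [Bool.or_eq_true, List.any_eq_true, PySem.Chars.startswith_iff,
      PySem.Chars.isIn_iff_infix, List.infix_cons_iff]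
    constructor
    · rintro (⟨k, hk, hp⟩ | ⟨k, hk, hi⟩)
      · exact ⟨k, hk, Or.inl hp⟩
      · exact ⟨k, hk, Or.inr hi⟩
    · rintro ⟨k, hk, hp | hi⟩
      · exact Or.inl ⟨k, hk, hp⟩
      · exact Or.inr ⟨k, hk, hi⟩

-- ===== VERDICT (by name: the statement is the Claim_ definition above) =====
set_option maxHeartbeats 1000000 in
theorem is_likely_cover_or_remix_spec : Claim_equal_is_likely_cover_or_remix := by
  intro artist_str track_str _
  unfold Spec_is_likely_cover_or_remix is_likely_cover_or_remix is_likely_cover_or_remix_alt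
  have hne : ∀ k ∈ coverKeywordsAlt, k ≠ [] := by decide
  rw [coverLoop_eq_any, scanPos_eq_any _ hne, scanPos_eq_any _ hne]
  have hmap : coverKeywords.map String.toList = coverKeywordsAlt := by rfl
  rw [← hmap, List.any_map, List.any_map]
  rw [Bool.eq_iff_iff]
  simp only [Bool.or_eq_true, List.any_eq_true, Function.comp,
    PySem.Str.isIn_eq]
  constructor
  · rintro ⟨k, hk, ha | hb⟩
    · exact Or.inl ⟨k, hk, ha⟩
    · exact Or.inr ⟨k, hk, hb⟩
  · rintro (⟨k, hk, ha⟩ | ⟨k, hk, hb⟩)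
    · exact ⟨k, hk, Or.inl ha⟩
    · exact ⟨k, hk, Or.inr hb⟩
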